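-- pv_equiv track=rewrite | github.com/drizztSun/common_project | PythonLeetcode/leetcodeM/670_MaximumSwap.py | doit_greedy
-- ===== SOURCE A (Python) =====
-- def doit_greedy(num):
--     A = list(map(int, str(num)))
--     last = {x: i for i, x in enumerate(A)}
--     for i, x in enumerate(A):
--         for d in range(9, x, -1):
--             if last.get(d, -1) > i:
--                 A[i], A[last[d]] = A[last[d]], A[i]
--                 return int("".join(map(str, A)))
--     return num
-- ===== SOURCE B (Python) =====
-- def doit_greedy(num):
--     digits = list(map(int, str(num)))
--     n = len(digits)
--     max_idx = n - 1
--     left = right = -1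
--     for i in range(n - 2, -1, -1):
--         if digits[i] > digits[max_idx]:
--             max_idx = i
--         elif digits[i] < digits[max_idx]:
--             left, right = i, max_idx
--     if left == -1:
--         return num
--     digits[left], digits[right] = digits[right], digits[left]
--     return int("".join(map(str, digits)))
-- ===== Notes on version B (the rewrite author's own statement) =====
-- stated objective: simpler
-- what changed: Replaces A's last-occurrence dict plus a nested top-down digit-value scan per position with a single right-to-left pass that tracks the index of the largest digit seen so far and records the leftmost improvable position with its swap partner.
import Mathlib
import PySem

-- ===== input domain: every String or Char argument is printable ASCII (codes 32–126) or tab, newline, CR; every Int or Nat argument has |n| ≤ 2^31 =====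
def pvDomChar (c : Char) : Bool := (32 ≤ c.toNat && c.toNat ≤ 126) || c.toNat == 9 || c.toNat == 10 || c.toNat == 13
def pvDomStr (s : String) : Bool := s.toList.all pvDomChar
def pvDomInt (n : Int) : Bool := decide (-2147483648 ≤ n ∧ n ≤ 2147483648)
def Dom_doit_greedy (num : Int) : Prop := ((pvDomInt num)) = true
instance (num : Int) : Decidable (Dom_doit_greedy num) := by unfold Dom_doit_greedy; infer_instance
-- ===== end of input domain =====

-- B replaces A's last-occurrence dict and per-position top-down digit-value scan by one
-- right-to-left pass tracking the rightmost maximal digit (objective: simpler).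

-- ===== PORT A =====
-- list(map(int, str(num))) — int(c) on a 1-char string; exact under Pre_ (digits only, so int() succeeds)
def pyDigits (num : Int) : List Int :=
  (PySem.Int.toChars num).map (fun c => (PySem.Int.ofChars? [c]).getD 0)

-- int("".join(map(str, A))) — exact here: the joined string is a nonempty digit string, so int() succeeds
def pyJoinInt (A : List Int) : Int :=
  (PySem.Int.ofStr? (PySem.Str.join "" (A.map PySem.Int.toStr))).getD 0

-- A[i], A[j] = A[j], A[i]  (the RHS pair is read first, then the two cells are written in order)
def pySwap (A : List Int) (i j : Int) : List Int :=
  PySem.List.pySetD (PySem.List.pySetD A i (PySem.List.pyGetD A j 0)) j (PySem.List.pyGetD A i 0)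

-- last = {x: i for i, x in enumerate(A)}
def lastDict (A : List Int) : PySem.Dict Int Int :=
  (PySem.List.enumerate A 0).foldl (fun d p => d.insert p.2 p.1) PySem.Dict.empty

-- inner 'for d in range(9, x, -1): if last.get(d, -1) > i: … return' = first match in the countdown
def innerFind (last : PySem.Dict Int Int) (i x : Int) : Option Int :=
  (PySem.List.pyRange 9 x (-1)).find? (fun d => decide (last.getD d (-1) > i))

-- outer 'for i, x in enumerate(A)' with early return
def aLoop (A : List Int) (last : PySem.Dict Int Int) (num : Int) : List (Int × Int) → Int
  | [] => num
  | (i, x) :: rest =>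
    match innerFind last i x with
    | some d => pyJoinInt (pySwap A i (last.getD d (-1)))   -- last[d]: the key is present, the guard held
    | none => aLoop A last num rest

def doit_greedy (num : Int) : Int :=
  let A := pyDigits num
  aLoop A (lastDict A) num (PySem.List.enumerate A 0)

-- ===== PORT B =====
-- one step of the right-to-left scan; state = (max_idx, left, right)
def bStep (digits : List Int) (st : Int × Int × Int) (i : Int) : Int × Int × Int :=
  if PySem.List.pyGetD digits i 0 > PySem.List.pyGetD digits st.1 0 then (i, st.2.1, st.2.2)
  else if PySem.List.pyGetD digits i 0 < PySem.List.pyGetD digits st.1 0 then (st.1, i, st.1)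
  else st

def doit_greedy_alt (num : Int) : Int :=
  let digits := pyDigits num
  let n : Int := PySem.List.len digits
  let st := (PySem.List.pyRange (n - 2) (-1) (-1)).foldl (bStep digits) (n - 1, -1, -1)
  if st.2.1 = -1 then num
  else pyJoinInt (pySwap digits st.2.1 st.2.2)

-- ===== PRECONDITION & SPEC =====
-- Pre_: num nonnegative — on negative num both Pythons raise ValueError (int of the sign character)
def Pre_doit_greedy (num : Int) : Prop := 0 ≤ num
instance (num : Int) : Decidable (Pre_doit_greedy num) := by unfold Pre_doit_greedy; infer_instance
def pvWitness_doit_greedy : Int := (2736)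

def Spec_doit_greedy (num : Int) (out : Int) : Prop := out = doit_greedy_alt num
instance (num : Int) (out : Int) : Decidable (Spec_doit_greedy num out) := by unfold Spec_doit_greedy; infer_instance

-- ===== CLAIM (what is proved, stated in full; the proofs are below) =====
def Claim_equal_doit_greedy : Prop := ∀ (num : Int), Dom_doit_greedy num → Pre_doit_greedy num → Spec_doit_greedy num (doit_greedy num)

-- ===== LEMMAS AND PROOFS =====

-- digit value at a Nat index
def gD (ds : List Int) (j : Nat) : Int := ds.getD j 0
-- "some later digit is strictly larger" — the condition under which both programs swap at i
def propAt (ds : List Int) (i : Nat) : Prop := ∃ j, i < j ∧ j < ds.length ∧ gD ds i < gD ds j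

def digitChars : List Char := ['0','1','2','3','4','5','6','7','8','9']

-- B's loop invariant: before processing index t-1, the state describes the suffix [t, length)
def InvB (ds : List Int) (t : Nat) (st : Int × Int × Int) : Prop :=
  (∃ mi : Nat, st.1 = (mi : Int) ∧ t ≤ mi ∧ mi < ds.length ∧
      (∀ j, t ≤ j → j < ds.length → gD ds j ≤ gD ds mi) ∧
      (∀ j, mi < j → j < ds.length → gD ds j < gD ds mi)) ∧
  ((st.2.1 = -1 ∧ st.2.2 = -1 ∧ ∀ i, t ≤ i → i < ds.length → ¬ propAt ds i) ∨
    (∃ i₀ r₀ : Nat, st.2.1 = (i₀ : Int) ∧ st.2.2 = (r₀ : Int) ∧ t ≤ i₀ ∧ i₀ < ds.length ∧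
      propAt ds i₀ ∧ (∀ i, t ≤ i → i < i₀ → ¬ propAt ds i) ∧
      i₀ < r₀ ∧ r₀ < ds.length ∧
      (∀ j, i₀ < j → j < ds.length → gD ds j ≤ gD ds r₀) ∧
      (∀ j, r₀ < j → j < ds.length → gD ds j < gD ds r₀)))

theorem toDigitsCore_mem (f : Nat) : ∀ (n : Nat) (acc : List Char),
    (∀ c ∈ acc, c ∈ digitChars) → ∀ c ∈ Nat.toDigitsCore 10 f n acc, c ∈ digitChars := by
  induction f with
  | zero => intro n acc hacc c hc; rw [Nat.toDigitsCore] at hc; exact hacc c hc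
  | succ f ih =>
    intro n acc hacc c hc
    rw [Nat.toDigitsCore] at hc
    have hd : (n % 10).digitChar ∈ digitChars := by
      have h10 : n % 10 < 10 := Nat.mod_lt _ (by norm_num)
      set m := n % 10 with hm
      interval_cases m <;> decide
    split at hc
    · rcases List.mem_cons.mp hc with rfl | hc
      · exact hd
      · exact hacc c hc
    · exact ih (n / 10) _ (by intro c' hc'; rcases List.mem_cons.mp hc' with rfl | hc'; exacts [hd, hacc c' hc']) c hc

theorem toDigitsCore_len (f : Nat) : ∀ (n : Nat) (acc : List Char),
    acc.length ≤ (Nat.toDigitsCore 10 f n acc).length := by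
  induction f with
  | zero => intro n acc; rw [Nat.toDigitsCore]
  | succ f ih =>
    intro n acc
    rw [Nat.toDigitsCore]
    split
    · simp
    · exact le_trans (by simp) (ih (n / 10) _)

theorem pyDigits_le9 (num : Int) (h : 0 ≤ num) : ∀ x ∈ pyDigits num, x ≤ 9 := by
  intro x hx
  unfold pyDigits at hx
  rcases List.mem_map.mp hx with ⟨c, hc, rfl⟩
  unfold PySem.Int.toChars at hc
  rw [if_neg (by omega)] at hc
  unfold Nat.toDigits at hc
  have hd : c ∈ digitChars := toDigitsCore_mem _ _ _ (by intro c' hc'; simp at hc') c hc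
  fin_cases hd <;> decide

theorem pyDigits_ne_nil (num : Int) (h : 0 ≤ num) : pyDigits num ≠ [] := by
  unfold pyDigits PySem.Int.toChars
  rw [if_neg (by omega)]
  unfold Nat.toDigits
  intro hcon
  have h1 : 1 ≤ (Nat.toDigitsCore 10 (num.toNat + 1) num.toNat []).length := by
    rw [Nat.toDigitsCore]
    split
    · simp
    · exact le_trans (by simp) (toDigitsCore_len _ _ _)
  rw [List.map_eq_nil_iff.mp hcon] at h1
  simp at h1

theorem find?_countdown_some_aux (p : Int → Bool) : ∀ (m : Nat) (a b d : Int), a - b ≤ m →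
    (PySem.List.pyRange a b (-1)).find? p = some d →
    b < d ∧ d ≤ a ∧ p d = true ∧ ∀ e, d < e → e ≤ a → p e = false := by
  intro m
  induction m with
  | zero =>
    intro a b d h hf
    rw [PySem.List.pyRange_neg_one_eq_nil (by omega)] at hf
    simp at hf
  | succ m ih =>
    intro a b d h hf
    by_cases hab : a ≤ b
    · rw [PySem.List.pyRange_neg_one_eq_nil hab] at hf; simp at hf
    · rw [PySem.List.pyRange_neg_one_cons (by omega)] at hf
      rw [List.find?_cons] at hf
      cases hp : p a with
      | true =>
        rw [hp] at hf
        simp at hf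
        subst hf
        exact ⟨by omega, le_refl _, hp, fun e he1 he2 => by omega⟩
      | false =>
        rw [hp] at hf
        rcases ih (a - 1) b d (by omega) hf with ⟨h1, h2, h3, h4⟩
        refine ⟨h1, by omega, h3, fun e he1 he2 => ?_⟩
        by_cases hea : e = a
        · subst hea; exact hp
        · exact h4 e he1 (by omega)

theorem find?_countdown_exists_aux (p : Int → Bool) : ∀ (m : Nat) (a b : Int), a - b ≤ m →
    (∃ d, b < d ∧ d ≤ a ∧ p d = true) →
    ∃ d, (PySem.List.pyRange a b (-1)).find? p = some d := by
  intro m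
  induction m with
  | zero => intro a b h ⟨d, h1, h2, _⟩; omega
  | succ m ih =>
    intro a b h ⟨d, h1, h2, h3⟩
    rw [PySem.List.pyRange_neg_one_cons (by omega)]
    rw [List.find?_cons]
    cases hp : p a with
    | true => exact ⟨a, rfl⟩
    | false =>
      apply ih (a - 1) b (by omega)
      refine ⟨d, h1, ?_, h3⟩
      by_cases hda : d = a
      · subst hda; rw [hp] at h3; cases h3
      · omega

theorem foldl_insert_getD (ps : List (Int × Int)) : ∀ (d0 : PySem.Dict Int Int) (v dflt : Int),
    (ps.foldl (fun d p => d.insert p.2 p.1) d0).getD v dflt =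
      match ps.reverse.find? (fun p => p.2 == v) with
      | some p => p.1
      | none => d0.getD v dflt := by
  induction ps with
  | nil => intro d0 v dflt; simp
  | cons p ps ih =>
    intro d0 v dflt
    rw [List.foldl_cons, ih]
    rw [List.reverse_cons, List.find?_append]
    cases hf : ps.reverse.find? (fun p => p.2 == v) with
    | some q => simp
    | none =>
      simp only [Option.none_or]
      rw [List.find?_singleton]
      rw [PySem.Dict.getD_insert]
      by_cases hv : v = p.2
      · subst hv; simp
      · rw [if_neg hv]
        have : (p.2 == v) = false := by simp [Ne.symm hv]
        simp [this]

theorem lastF_char (ds : List Int) (v : Int) :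
    ((lastDict ds).getD v (-1) = -1 ∧ ∀ j, j < ds.length → gD ds j ≠ v) ∨
    (∃ j : Nat, (lastDict ds).getD v (-1) = (j : Int) ∧ j < ds.length ∧ gD ds j = v ∧
      ∀ j', j < j' → j' < ds.length → gD ds j' ≠ v) := by
  unfold lastDict
  rw [foldl_insert_getD]
  cases hf : (PySem.List.enumerate ds 0).reverse.find? (fun p => p.2 == v) with
  | none =>
    left
    refine ⟨by simp, fun j hj hv => ?_⟩
    have hmem : ((j : Int), ds[j]) ∈ (PySem.List.enumerate ds 0).reverse := by
      rw [List.mem_reverse, PySem.List.mem_enumerate_iff]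
      exact ⟨j, hj, by simp⟩
    have : ∃ x ∈ (PySem.List.enumerate ds 0).reverse, (fun p : Int × Int => p.2 == v) x = true := by
      refine ⟨_, hmem, ?_⟩
      simp only [beq_iff_eq]
      rw [← List.getD_eq_getElem ds 0 hj]
      exact hv
    rw [← List.find?_isSome] at this
    rw [hf] at this
    simp at this
  | some q =>
    right
    have hq := List.find?_some hf
    have hqmem : q ∈ PySem.List.enumerate ds 0 := List.mem_reverse.mp (List.mem_of_find?_eq_some hf)
    rcases (PySem.List.mem_enumerate_iff ds 0 q).mp hqmem with ⟨k, hk, hqk⟩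
    refine ⟨k, by simp [hqk], hk, ?_, ?_⟩
    · rw [hqk] at hq; simp only [beq_iff_eq] at hq
      rw [gD, List.getD_eq_getElem ds 0 hk]; exact hq
    · intro j' hj1 hj2 hv
      rcases List.find?_eq_some_iff_append.mp hf with ⟨hpq, as, bs, heq, has⟩
      -- the element (j', ds[j']) is in the reverse list and matches
      have hmem : ((j' : Int), ds[j']) ∈ (PySem.List.enumerate ds 0).reverse := by
        rw [List.mem_reverse, PySem.List.mem_enumerate_iff]
        exact ⟨j', hj2, by simp⟩
      have hpw : List.Pairwise (fun p q : Int × Int => q.1 < p.1) (PySem.List.enumerate ds 0).reverse := by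
        rw [List.pairwise_reverse]; exact PySem.List.pairwise_lt_enumerate ds 0
      rw [heq] at hmem hpw
      have hmatch : ((fun p : Int × Int => p.2 == v) ((j' : Int), ds[j'])) = true := by
        simp only [beq_iff_eq]
        rw [← List.getD_eq_getElem ds 0 hj2]; exact hv
      rcases List.mem_append.mp hmem with hin | hin
      · have h7 := has _ hin
        simp only [beq_iff_eq] at hmatch h7
        rw [Bool.not_eq_eq_eq_not] at h7
        simp at h7 hmatch
        exact h7 hmatch
      · rcases List.mem_cons.mp hin with heq2 | hin
        · have h5 : ((j' : Int), ds[j']) = (0 + (k : Int), ds[k]) := heq2.trans hqk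
          have h6 := congrArg Prod.fst h5
          simp at h6
          omega
        · rcases List.pairwise_append.mp hpw with ⟨_, hpw2, _⟩
          have := (List.pairwise_cons.mp hpw2).1 _ hin
          rw [hqk] at this
          simp at this
          omega

theorem gD_mem (ds : List Int) (j : Nat) (hj : j < ds.length) : gD ds j ∈ ds := by
  rw [gD, List.getD_eq_getElem ds 0 hj]; exact List.getElem_mem hj

theorem lastF_gt (ds : List Int) (i j : Nat) (hij : i < j) (hj : j < ds.length) :
    (lastDict ds).getD (gD ds j) (-1) > (i : Int) := by
  rcases lastF_char ds (gD ds j) with ⟨_, hnone⟩ | ⟨j₂, heq, hj₂, hval, hlast⟩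
  · exact absurd rfl (hnone j hj)
  · rw [heq]
    by_cases h : j ≤ j₂
    · exact_mod_cast by omega
    · exact absurd rfl (hlast j (by omega) hj)

theorem inner_some (ds : List Int) (Hb : ∀ x ∈ ds, x ≤ 9) (i : Nat) (hi : i < ds.length)
    (hp : propAt ds i) : ∃ d, innerFind (lastDict ds) i (gD ds i) = some d := by
  rcases hp with ⟨j, hij, hj, hlt⟩
  apply find?_countdown_exists_aux _ (9 - gD ds i).toNat _ _ (by omega)
  refine ⟨gD ds j, hlt, Hb _ (gD_mem ds j hj), ?_⟩
  simp only [decide_eq_true_eq]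
  exact lastF_gt ds i j hij hj

theorem inner_char (ds : List Int) (Hb : ∀ x ∈ ds, x ≤ 9) (i : Nat) (hi : i < ds.length)
    (d : Int) (hf : innerFind (lastDict ds) i (gD ds i) = some d) :
    propAt ds i ∧ ∀ r : Nat, i < r → r < ds.length →
      (∀ j, i < j → j < ds.length → gD ds j ≤ gD ds r) →
      (∀ j, r < j → j < ds.length → gD ds j < gD ds r) →
      (lastDict ds).getD d (-1) = (r : Int) := by
  rcases find?_countdown_some_aux _ (9 - gD ds i).toNat _ _ _ (by omega) hf with ⟨h1, h2, h3, h4⟩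
  simp only [decide_eq_true_eq] at h3
  -- the dict entry for d: some index j with value d, last such
  rcases lastF_char ds d with ⟨heq, _⟩ | ⟨j, heq, hjlen, hjval, hjlast⟩
  · rw [heq] at h3; omega
  · rw [heq] at h3
    have hij : i < j := by exact_mod_cast by omega
    constructor
    · exact ⟨j, hij, hjlen, by omega⟩
    · intro r hir hrlen hmax hright
      -- first: d = gD ds r
      have hdr : d ≤ gD ds r := hjval ▸ hmax j hij hjlen
      have hd9 : gD ds r ≤ 9 := Hb _ (gD_mem ds r hrlen)
      have hdeq : d = gD ds r := by
        by_contra hne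
        have h5 := h4 (gD ds r) (by omega) hd9
        have h6 : ¬ ((lastDict ds).getD (gD ds r) (-1) > (i : Int)) := of_decide_eq_false h5
        exact h6 (lastF_gt ds i r hir hrlen)
      -- then: j = r
      rw [heq]
      have hjr : j = r := by
        by_cases hlt : j < r
        · exact absurd hdeq.symm (hjlast r hlt hrlen)
        · by_cases hgt : r < j
          · have := hright j hgt hjlen
            omega
          · omega
      rw [hjr]

theorem aLoop_of_none_aux (ds : List Int) (Hb : ∀ x ∈ ds, x ≤ 9) (num : Int) : ∀ (m k : Nat),
    ds.length - k ≤ m →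
    (∀ i, k ≤ i → i < ds.length → ¬ propAt ds i) →
    aLoop ds (lastDict ds) num (PySem.List.enumerate (ds.drop k) k) = num := by
  intro m
  induction m with
  | zero =>
    intro k hm _
    rw [List.drop_eq_nil_of_le (by omega)]
    simp [PySem.List.enumerate_nil, aLoop]
  | succ m ih =>
    intro k hm hnone
    by_cases hk : k < ds.length
    · rw [List.drop_eq_getElem_cons hk, PySem.List.enumerate_cons]
      rw [aLoop]
      have hfind : innerFind (lastDict ds) k ds[k] = none := by
        cases hf : innerFind (lastDict ds) k ds[k] with
        | none => rfl
        | some d =>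
          rw [show ds[k] = gD ds k from (List.getD_eq_getElem ds 0 hk).symm] at hf
          exact absurd (inner_char ds Hb k hk d hf).1 (hnone k le_rfl hk)
      rw [hfind]
      have : ((k : Int) + 1) = ((k + 1 : Nat) : Int) := by push_cast; ring
      rw [this]
      exact ih (k + 1) (by omega) (fun i h1 h2 => hnone i (by omega) h2)
    · rw [List.drop_eq_nil_of_le (by omega)]
      simp [PySem.List.enumerate_nil, aLoop]

theorem aLoop_of_found_aux (ds : List Int) (Hb : ∀ x ∈ ds, x ≤ 9) (num : Int)
    (i₀ r₀ : Nat) (hi₀ : i₀ < ds.length) (hp : propAt ds i₀)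
    (hr₁ : i₀ < r₀) (hr₂ : r₀ < ds.length)
    (hmax : ∀ j, i₀ < j → j < ds.length → gD ds j ≤ gD ds r₀)
    (hright : ∀ j, r₀ < j → j < ds.length → gD ds j < gD ds r₀) :
    ∀ (m k : Nat), i₀ - k ≤ m → k ≤ i₀ → (∀ i, k ≤ i → i < i₀ → ¬ propAt ds i) →
    aLoop ds (lastDict ds) num (PySem.List.enumerate (ds.drop k) k) =
      pyJoinInt (pySwap ds i₀ r₀) := by
  intro m
  induction m with
  | zero =>
    intro k hm hk _
    have hki : k = i₀ := by omega
    subst hki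
    rw [List.drop_eq_getElem_cons hi₀, PySem.List.enumerate_cons]
    rw [aLoop]
    have hx : ds[k] = gD ds k := (List.getD_eq_getElem ds 0 hi₀).symm
    rw [hx]
    rcases inner_some ds Hb k hi₀ hp with ⟨d, hd⟩
    rw [hd]
    show pyJoinInt (pySwap ds k ((lastDict ds).getD d (-1))) = pyJoinInt (pySwap ds k r₀)
    rw [(inner_char ds Hb k hi₀ d hd).2 r₀ hr₁ hr₂ hmax hright]
  | succ m ih =>
    intro k hm hk hnone
    by_cases hki : k = i₀
    · subst hki
      rw [List.drop_eq_getElem_cons hi₀, PySem.List.enumerate_cons]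
      rw [aLoop]
      have hx : ds[k] = gD ds k := (List.getD_eq_getElem ds 0 hi₀).symm
      rw [hx]
      rcases inner_some ds Hb k hi₀ hp with ⟨d, hd⟩
      rw [hd]
      show pyJoinInt (pySwap ds k ((lastDict ds).getD d (-1))) = pyJoinInt (pySwap ds k r₀)
      rw [(inner_char ds Hb k hi₀ d hd).2 r₀ hr₁ hr₂ hmax hright]
    · have hk2 : k < ds.length := by omega
      rw [List.drop_eq_getElem_cons hk2, PySem.List.enumerate_cons]
      rw [aLoop]
      have hfind : innerFind (lastDict ds) k ds[k] = none := by
        cases hf : innerFind (lastDict ds) k ds[k] with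
        | none => rfl
        | some d =>
          rw [show ds[k] = gD ds k from (List.getD_eq_getElem ds 0 hk2).symm] at hf
          exact absurd (inner_char ds Hb k hk2 d hf).1 (hnone k le_rfl (by omega))
      rw [hfind]
      have : ((k : Int) + 1) = ((k + 1 : Nat) : Int) := by push_cast; ring
      rw [this]
      exact ih (k + 1) (by omega) (by omega) (fun i h1 h2 => hnone i (by omega) h2)

theorem pyGetD_gD (ds : List Int) (k : Nat) : PySem.List.pyGetD ds (k : Int) 0 = gD ds k := by
  rw [PySem.List.pyGetD_natCast]; rfl

theorem bStep_inv (ds : List Int) (t : Nat) (ht : t < ds.length) (st : Int × Int × Int)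
    (h : InvB ds (t + 1) st) : InvB ds t (bStep ds st (t : Int)) := by
  rcases h with ⟨⟨mi, hmi1, hmi2, hmi3, hmi4, hmi5⟩, hcand⟩
  rw [bStep, hmi1, pyGetD_gD, pyGetD_gD]
  by_cases hgt : gD ds t > gD ds mi
  · rw [if_pos hgt]
    have hnp : ¬ propAt ds t := by
      rintro ⟨j, hj1, hj2, hj3⟩
      have : gD ds j ≤ gD ds mi := hmi4 j (by omega) hj2
      omega
    constructor
    · refine ⟨t, rfl, le_rfl, ht, fun j h1 h2 => ?_, fun j h1 h2 => ?_⟩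
      · by_cases hjt : j = t
        · subst hjt; exact le_rfl
        · have := hmi4 j (by omega) h2; omega
      · have := hmi4 j (by omega) h2; omega
    · rcases hcand with ⟨h1, h2, h3⟩ | ⟨i₀, r₀, h1, h2, h3, h4, h5, h6, h7, h8, h9, h10⟩
      · left
        refine ⟨h1, h2, fun i hi1 hi2 => ?_⟩
        by_cases hit : i = t
        · subst hit; exact hnp
        · exact h3 i (by omega) hi2
      · right
        refine ⟨i₀, r₀, h1, h2, by omega, h4, h5, fun i hi1 hi2 => ?_, h7, h8, h9, h10⟩
        by_cases hit : i = t
        · subst hit; exact hnp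
        · exact h6 i (by omega) hi2
  · rw [if_neg hgt]
    by_cases hlt : gD ds t < gD ds mi
    · rw [if_pos hlt]
      have hp : propAt ds t := ⟨mi, by omega, hmi3, hlt⟩
      constructor
      · refine ⟨mi, rfl, by omega, hmi3, fun j h1 h2 => ?_, hmi5⟩
        by_cases hjt : j = t
        · subst hjt; omega
        · exact hmi4 j (by omega) h2
      · right
        exact ⟨t, mi, rfl, rfl, le_rfl, ht, hp, fun i hi1 hi2 => by omega, by omega, hmi3,
          fun j h1 h2 => hmi4 j (by omega) h2, hmi5⟩
    · rw [if_neg hlt]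
      have heq : gD ds t = gD ds mi := by omega
      have hnp : ¬ propAt ds t := by
        rintro ⟨j, hj1, hj2, hj3⟩
        have : gD ds j ≤ gD ds mi := hmi4 j (by omega) hj2
        omega
      constructor
      · refine ⟨mi, hmi1, by omega, hmi3, fun j h1 h2 => ?_, hmi5⟩
        by_cases hjt : j = t
        · subst hjt; omega
        · exact hmi4 j (by omega) h2
      · rcases hcand with ⟨h1, h2, h3⟩ | ⟨i₀, r₀, h1, h2, h3, h4, h5, h6, h7, h8, h9, h10⟩
        · left
          refine ⟨h1, h2, fun i hi1 hi2 => ?_⟩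
          by_cases hit : i = t
          · subst hit; exact hnp
          · exact h3 i (by omega) hi2
        · right
          refine ⟨i₀, r₀, h1, h2, by omega, h4, h5, fun i hi1 hi2 => ?_, h7, h8, h9, h10⟩
          by_cases hit : i = t
          · subst hit; exact hnp
          · exact h6 i (by omega) hi2

theorem bFold_inv (ds : List Int) : ∀ (t : Nat) (st : Int × Int × Int), t ≤ ds.length →
    InvB ds t st →
    InvB ds 0 ((PySem.List.pyRange ((t : Int) - 1) (-1) (-1)).foldl (bStep ds) st) := by
  intro t
  induction t with
  | zero =>
    intro st _ h
    rw [PySem.List.pyRange_neg_one_eq_nil (by omega)]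
    exact h
  | succ t ih =>
    intro st hlen h
    have h1 : ((t + 1 : Nat) : Int) - 1 = (t : Int) := by push_cast; ring
    rw [h1, PySem.List.pyRange_neg_one_cons (by omega), List.foldl_cons]
    exact ih _ (by omega) (bStep_inv ds t (by omega) st h)

theorem main_eq (num : Int) (hpre : 0 ≤ num) : doit_greedy num = doit_greedy_alt num := by
  simp only [doit_greedy, doit_greedy_alt]
  set ds := pyDigits num with hds
  have Hb := pyDigits_le9 num hpre
  have hne := pyDigits_ne_nil num hpre
  have hlen : 1 ≤ ds.length := List.length_pos_of_ne_nil hne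
  have h0 : InvB ds (ds.length - 1) ((PySem.List.len ds) - 1, -1, -1) := by
    constructor
    · refine ⟨ds.length - 1, ?_, le_rfl, by omega, ?_, ?_⟩
      · simp only [PySem.List.len_eq]; push_cast [hlen]; omega
      · intro j h1 h2
        have : j = ds.length - 1 := by omega
        subst this; exact le_rfl
      · intro j h1 h2; omega
    · left
      refine ⟨rfl, rfl, fun i h1 h2 => ?_⟩
      rintro ⟨j, hj1, hj2, _⟩; omega
  have hfold := bFold_inv ds (ds.length - 1) _ (by omega) h0
  have hstart : (PySem.List.len ds) - 2 = ((ds.length - 1 : Nat) : Int) - 1 := by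
    simp only [PySem.List.len_eq]; push_cast [hlen]; omega
  rw [hstart]
  set st := (PySem.List.pyRange (((ds.length - 1 : Nat) : Int) - 1) (-1) (-1)).foldl (bStep ds)
      ((PySem.List.len ds) - 1, -1, -1) with hst
  rcases hfold.2 with ⟨hl, hr, hnone⟩ | ⟨i₀, r₀, h1, h2, _, h4, h5, h6, h7, h8, h9, h10⟩
  · rw [if_pos hl]
    have := aLoop_of_none_aux ds Hb num ds.length 0 (by omega) (fun i _ h2 => hnone i (by omega) h2)
    rw [List.drop_zero, Nat.cast_zero] at this
    exact this
  · rw [if_neg (by rw [h1]; omega)]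
    rw [h1, h2]
    have := aLoop_of_found_aux ds Hb num i₀ r₀ h4 h5 h7 h8 h9 h10 i₀ 0 (by omega) (by omega)
      (fun i _ h2 => h6 i (by omega) h2)
    rw [List.drop_zero, Nat.cast_zero] at this
    exact this

-- ===== VERDICT (by name: the statement is the Claim_ definition above) =====
theorem doit_greedy_spec : Claim_equal_doit_greedy := by
  intro num _ hpre
  unfold Spec_doit_greedy
  exact main_eq num hpre
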